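-- pv_equiv track=rewrite | github.com/Reshigan/Aria---Document-Management-Employee | backend/app/api/agents.py | categorize_agent
-- ===== SOURCE A (Python) =====
-- def categorize_agent(agent_name: str) -> str:
--     """Categorize agent based on name"""
--     if any(x in agent_name for x in ["invoice", "accounts_payable", "accounts_receivable", "ar_collections", "expense"]):
--         return "Financial Operations"
--     elif any(x in agent_name for x in ["bank", "cash", "payment", "treasury"]):
--         return "Banking & Treasury"
--     elif any(x in agent_name for x in ["tax", "compliance", "bbbee", "audit"]):
--         return "Compliance & Regulatory"
--     elif any(x in agent_name for x in ["payroll", "hr", "employee", "benefits", "leave"]):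
--         return "Human Resources"
--     elif any(x in agent_name for x in ["inventory", "procurement", "supplier", "purchase", "stock", "warehouse"]):
--         return "Supply Chain"
--     elif any(x in agent_name for x in ["sales", "customer", "order", "crm", "lead"]):
--         return "Sales & CRM"
--     elif any(x in agent_name for x in ["production", "manufacturing", "quality", "maintenance", "mrp"]):
--         return "Manufacturing"
--     elif any(x in agent_name for x in ["general_ledger", "journal", "financial_close", "financial_reporting"]):
--         return "Accounting"
--     elif any(x in agent_name for x in ["document", "email", "data", "archive"]):
--         return "Document Management"
--     else:
--         return "General Operations"
-- ===== SOURCE B (Python) =====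
-- _KEYWORD_GROUPS = [
--     ["invoice", "accounts_payable", "accounts_receivable", "ar_collections", "expense"],
--     ["bank", "cash", "payment", "treasury"],
--     ["tax", "compliance", "bbbee", "audit"],
--     ["payroll", "hr", "employee", "benefits", "leave"],
--     ["inventory", "procurement", "supplier", "purchase", "stock", "warehouse"],
--     ["sales", "customer", "order", "crm", "lead"],
--     ["production", "manufacturing", "quality", "maintenance", "mrp"],
--     ["general_ledger", "journal", "financial_close", "financial_reporting"],
--     ["document", "email", "data", "archive"],
-- ]
-- CATEGORIES = [
--     "Financial Operations", "Banking & Treasury", "Compliance & Regulatory",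
--     "Human Resources", "Supply Chain", "Sales & CRM", "Manufacturing",
--     "Accounting", "Document Management",
-- ]
-- # flat keyword -> priority rank map
-- KEYWORD_RANK = {kw: i for i, kws in enumerate(_KEYWORD_GROUPS) for kw in kws}
--
-- def categorize_agent(agent_name: str) -> str:
--     """Categorize agent: take the best (minimum) priority rank over ALL matching keywords."""
--     best = min((rank for kw, rank in KEYWORD_RANK.items() if kw in agent_name), default=None)
--     return "General Operations" if best is None else CATEGORIES[best]
-- ===== Notes on version B (the rewrite author's own statement) =====
-- stated objective: alternative
-- what changed: A's nine short-circuiting if/elif branches are replaced by a flat keyword->rank dict scanned in full: B collects the ranks of ALL matching keywords and returns the category of the minimum rank (min-over-matches instead of first-match branch chain).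
import Mathlib
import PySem

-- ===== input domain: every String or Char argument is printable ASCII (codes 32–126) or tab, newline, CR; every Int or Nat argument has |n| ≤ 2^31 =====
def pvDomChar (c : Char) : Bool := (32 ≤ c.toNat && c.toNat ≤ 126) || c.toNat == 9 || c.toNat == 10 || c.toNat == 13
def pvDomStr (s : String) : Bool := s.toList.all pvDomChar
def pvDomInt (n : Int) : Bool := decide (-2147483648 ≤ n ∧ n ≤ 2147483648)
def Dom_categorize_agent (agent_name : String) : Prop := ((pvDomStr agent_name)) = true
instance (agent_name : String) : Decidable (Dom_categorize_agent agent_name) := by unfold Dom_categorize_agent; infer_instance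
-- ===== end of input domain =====

-- B replaces A's nine short-circuiting if/elif branches by a full scan of a flat keyword->rank map,
-- returning the category of the MINIMUM rank among all matching keywords (same value everywhere; alternative, not faster).


-- ===== PORT A =====
def categorize_agent (agent_name : String) : String :=
  if ["invoice", "accounts_payable", "accounts_receivable", "ar_collections", "expense"].any (fun x => PySem.Str.isIn x agent_name) then
    "Financial Operations"
  else if ["bank", "cash", "payment", "treasury"].any (fun x => PySem.Str.isIn x agent_name) then
    "Banking & Treasury"
  else if ["tax", "compliance", "bbbee", "audit"].any (fun x => PySem.Str.isIn x agent_name) then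
    "Compliance & Regulatory"
  else if ["payroll", "hr", "employee", "benefits", "leave"].any (fun x => PySem.Str.isIn x agent_name) then
    "Human Resources"
  else if ["inventory", "procurement", "supplier", "purchase", "stock", "warehouse"].any (fun x => PySem.Str.isIn x agent_name) then
    "Supply Chain"
  else if ["sales", "customer", "order", "crm", "lead"].any (fun x => PySem.Str.isIn x agent_name) then
    "Sales & CRM"
  else if ["production", "manufacturing", "quality", "maintenance", "mrp"].any (fun x => PySem.Str.isIn x agent_name) then
    "Manufacturing"
  else if ["general_ledger", "journal", "financial_close", "financial_reporting"].any (fun x => PySem.Str.isIn x agent_name) then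
    "Accounting"
  else if ["document", "email", "data", "archive"].any (fun x => PySem.Str.isIn x agent_name) then
    "Document Management"
  else
    "General Operations"

-- ===== PORT B =====
-- Source B's CATEGORIES list
def pvCategories : List String :=
  [ "Financial Operations", "Banking & Treasury", "Compliance & Regulatory",
    "Human Resources", "Supply Chain", "Sales & CRM", "Manufacturing",
    "Accounting", "Document Management" ]

-- Source B's KEYWORD_RANK dict (insertion order = the comprehension's enumerate order)
def pvKeywordRank : List (String × Nat) :=
  (["invoice", "accounts_payable", "accounts_receivable", "ar_collections", "expense"].map (fun k => (k, 0))) ++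
  (["bank", "cash", "payment", "treasury"].map (fun k => (k, 1))) ++
  (["tax", "compliance", "bbbee", "audit"].map (fun k => (k, 2))) ++
  (["payroll", "hr", "employee", "benefits", "leave"].map (fun k => (k, 3))) ++
  (["inventory", "procurement", "supplier", "purchase", "stock", "warehouse"].map (fun k => (k, 4))) ++
  (["sales", "customer", "order", "crm", "lead"].map (fun k => (k, 5))) ++
  (["production", "manufacturing", "quality", "maintenance", "mrp"].map (fun k => (k, 6))) ++
  (["general_ledger", "journal", "financial_close", "financial_reporting"].map (fun k => (k, 7))) ++
  (["document", "email", "data", "archive"].map (fun k => (k, 8)))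

-- running minimum: the state of Python's min(...) over the generator
def pvMinOpt (acc : Option Nat) (r : Nat) : Nat :=
  match acc with
  | none => r
  | some a => Nat.min a r

-- one generator step of min((rank for kw, rank in KEYWORD_RANK.items() if kw in agent_name), default=None)
def pvStep (agent_name : String) (acc : Option Nat) (p : String × Nat) : Option Nat :=
  if PySem.Str.isIn p.1 agent_name then some (pvMinOpt acc p.2) else acc

def pvBest (agent_name : String) : Option Nat :=
  pvKeywordRank.foldl (pvStep agent_name) none

def categorize_agent_alt (agent_name : String) : String :=
  match pvBest agent_name with
  | none => "General Operations"
  | some r => pvCategories.getD r ""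

-- ===== PRECONDITION & SPEC =====
def Spec_categorize_agent (agent_name : String) (out : String) : Prop := out = categorize_agent_alt agent_name
instance (agent_name : String) (out : String) : Decidable (Spec_categorize_agent agent_name out) := by unfold Spec_categorize_agent; infer_instance

-- ===== CLAIM (what is proved, stated in full; the proofs are below) =====
def Claim_equal_categorize_agent : Prop := ∀ (agent_name : String), Dom_categorize_agent agent_name → Spec_categorize_agent agent_name (categorize_agent agent_name)

-- ===== LEMMAS AND PROOFS =====

-- min (min a r) r = min a r (the running minimum absorbs a repeated candidate)
theorem pvMinOpt_absorb (acc : Option Nat) (r : Nat) :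
    pvMinOpt (some (pvMinOpt acc r)) r = pvMinOpt acc r := by
  cases acc <;> simp [pvMinOpt]

-- Folding the min-step over one constant-rank segment lowers the running minimum to r
-- exactly when some keyword of the segment matches.
theorem pvScanSeg (agent_name : String) (r : Nat) (kws : List String) (acc : Option Nat) :
    List.foldl (pvStep agent_name) acc (kws.map (fun k => (k, r))) =
      if (kws.any (fun x => PySem.Str.isIn x agent_name)) = true then some (pvMinOpt acc r) else acc := by
  induction kws generalizing acc with
  | nil => simp
  | cons k kws ih =>
    simp only [List.map_cons, List.foldl_cons, List.any_cons]
    have hstep : pvStep agent_name acc (k, r) =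
        if PySem.Str.isIn k agent_name then some (pvMinOpt acc r) else acc := rfl
    rw [ih, hstep]
    by_cases hk : PySem.Str.isIn k agent_name = true
    · simp only [hk]
      simp [pvMinOpt_absorb]
    · have hk' : PySem.Str.isIn k agent_name = false := by
        cases h : PySem.Str.isIn k agent_name
        · rfl
        · exact absurd h hk
      simp only [hk']
      simp

-- Once the running minimum is a and every remaining rank is ≥ a, the fold never changes it.
theorem pvFoldMin_le (agent_name : String) (a : Nat) (l : List (String × Nat))
    (h : ∀ p ∈ l, a ≤ p.2) :
    List.foldl (pvStep agent_name) (some a) l = some a := by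
  induction l with
  | nil => rfl
  | cons p l ih =>
    have hp : a ≤ p.2 := h p (List.mem_cons_self ..)
    have hmin : pvMinOpt (some a) p.2 = a := by simp [pvMinOpt, Nat.min_eq_left hp]
    simp only [List.foldl_cons, pvStep, hmin]
    rw [ite_self]
    exact ih (fun q hq => h q (List.mem_cons_of_mem _ hq))

-- ===== VERDICT (by name: the statement is the Claim_ definition above) =====
theorem categorize_agent_spec : Claim_equal_categorize_agent := by
  intro agent_name _
  show categorize_agent agent_name = categorize_agent_alt agent_name
  unfold categorize_agent categorize_agent_alt pvBest pvKeywordRank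
  simp only [List.append_assoc]
  by_cases h0 : (["invoice", "accounts_payable", "accounts_receivable", "ar_collections", "expense"].any (fun x => PySem.Str.isIn x agent_name)) = true
  · rw [if_pos h0]
    rw [List.foldl_append, pvScanSeg, if_pos h0]
    have e : pvMinOpt none 0 = 0 := rfl
    rw [e, pvFoldMin_le]
    · rfl
    · decide
  · rw [if_neg h0]
    rw [List.foldl_append, pvScanSeg, if_neg h0]
    by_cases h1 : (["bank", "cash", "payment", "treasury"].any (fun x => PySem.Str.isIn x agent_name)) = true
    · rw [if_pos h1]
      rw [List.foldl_append, pvScanSeg, if_pos h1]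
      have e : pvMinOpt none 1 = 1 := rfl
      rw [e, pvFoldMin_le]
      · rfl
      · decide
    · rw [if_neg h1]
      rw [List.foldl_append, pvScanSeg, if_neg h1]
      by_cases h2 : (["tax", "compliance", "bbbee", "audit"].any (fun x => PySem.Str.isIn x agent_name)) = true
      · rw [if_pos h2]
        rw [List.foldl_append, pvScanSeg, if_pos h2]
        have e : pvMinOpt none 2 = 2 := rfl
        rw [e, pvFoldMin_le]
        · rfl
        · decide
      · rw [if_neg h2]
        rw [List.foldl_append, pvScanSeg, if_neg h2]
        by_cases h3 : (["payroll", "hr", "employee", "benefits", "leave"].any (fun x => PySem.Str.isIn x agent_name)) = true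
        · rw [if_pos h3]
          rw [List.foldl_append, pvScanSeg, if_pos h3]
          have e : pvMinOpt none 3 = 3 := rfl
          rw [e, pvFoldMin_le]
          · rfl
          · decide
        · rw [if_neg h3]
          rw [List.foldl_append, pvScanSeg, if_neg h3]
          by_cases h4 : (["inventory", "procurement", "supplier", "purchase", "stock", "warehouse"].any (fun x => PySem.Str.isIn x agent_name)) = true
          · rw [if_pos h4]
            rw [List.foldl_append, pvScanSeg, if_pos h4]
            have e : pvMinOpt none 4 = 4 := rfl
            rw [e, pvFoldMin_le]
            · rfl
            · decide
          · rw [if_neg h4]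
            rw [List.foldl_append, pvScanSeg, if_neg h4]
            by_cases h5 : (["sales", "customer", "order", "crm", "lead"].any (fun x => PySem.Str.isIn x agent_name)) = true
            · rw [if_pos h5]
              rw [List.foldl_append, pvScanSeg, if_pos h5]
              have e : pvMinOpt none 5 = 5 := rfl
              rw [e, pvFoldMin_le]
              · rfl
              · decide
            · rw [if_neg h5]
              rw [List.foldl_append, pvScanSeg, if_neg h5]
              by_cases h6 : (["production", "manufacturing", "quality", "maintenance", "mrp"].any (fun x => PySem.Str.isIn x agent_name)) = true
              · rw [if_pos h6]
                rw [List.foldl_append, pvScanSeg, if_pos h6]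
                have e : pvMinOpt none 6 = 6 := rfl
                rw [e, pvFoldMin_le]
                · rfl
                · decide
              · rw [if_neg h6]
                rw [List.foldl_append, pvScanSeg, if_neg h6]
                by_cases h7 : (["general_ledger", "journal", "financial_close", "financial_reporting"].any (fun x => PySem.Str.isIn x agent_name)) = true
                · rw [if_pos h7]
                  rw [List.foldl_append, pvScanSeg agent_name 7 ["general_ledger", "journal", "financial_close", "financial_reporting"], if_pos h7]
                  have e : pvMinOpt none 7 = 7 := rfl
                  rw [e, pvFoldMin_le]
                  · rfl
                  · decide
                · rw [if_neg h7]
                  rw [List.foldl_append, pvScanSeg agent_name 7 ["general_ledger", "journal", "financial_close", "financial_reporting"], if_neg h7]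
                  by_cases h8 : (["document", "email", "data", "archive"].any (fun x => PySem.Str.isIn x agent_name)) = true
                  · rw [if_pos h8]
                    rw [pvScanSeg, if_pos h8]
                    rfl
                  · rw [if_neg h8]
                    rw [pvScanSeg, if_neg h8]
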